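-- pv_equiv track=rewrite | github.com/flengyel/Operations-Tensorielles-Simpliciales | src/notebooks/finite_difference_analysis.py | generate_shape_path
-- ===== SOURCE A (Python) =====
-- from typing import List, Tuple, Set
--
-- def generate_shape_path(target_shape: Tuple[int, ...]) -> List[Tuple[int, ...]]:
--     """
--     Generates a canonical path of shapes from the fundamental shape to the target shape.
--     The path is built by incrementing one component at a time, from right to left.
--
--     Args:
--         target_shape: The final shape tuple to reach.
--
--     Returns:
--         A list of shape tuples representing the path.
--     """
--     if not target_shape:
--         return []
--
--     # 1. Determine the fundamental shape
--     min_val = min(target_shape)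
--     k = len(target_shape)
--     fundamental_shape = tuple([min_val] * k)
--
--     path = [fundamental_shape]
--     current_shape = list(fundamental_shape)
--
--     # Ensure target_shape is sorted to make the path canonical and easier to analyze
--     sorted_target = tuple(sorted(target_shape))
--
--     # 4. Increment from right to left to build the path
--     for i in range(k - 1, -1, -1):
--         # Increment the current component up to its target value
--         while current_shape[i] < sorted_target[i]:
--             current_shape[i] += 1
--             # Add a sorted version to the path to handle symmetries
--             path.append(tuple(sorted(current_shape)))
--
--     # The path may contain duplicates if the target was not sorted, remove them.
--     # We use a dictionary to preserve order while removing duplicates.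
--     return list(dict.fromkeys(path))
-- ===== SOURCE B (Python) =====
-- def generate_shape_path(target_shape):
--     if not target_shape:
--         return []
--     min_val = min(target_shape)
--     k = len(target_shape)
--     sorted_target = tuple(sorted(target_shape))
--     path = [(min_val,) * k]
--     for i in range(k - 1, -1, -1):
--         for v in range(min_val + 1, sorted_target[i] + 1):
--             path.append(tuple(min_val if j < i else v if j == i else sorted_target[j]
--                               for j in range(k)))
--     return path
-- ===== Notes on version B (the rewrite author's own statement) =====
-- stated objective: alternative
-- what changed: B builds each path tuple pointwise in closed form (min below position i, the incremented value v at i, the sorted target above i) instead of mutating a running shape, and drops both A's per-step sort and its final duplicate removal, which are provably no-ops.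
import Mathlib
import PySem

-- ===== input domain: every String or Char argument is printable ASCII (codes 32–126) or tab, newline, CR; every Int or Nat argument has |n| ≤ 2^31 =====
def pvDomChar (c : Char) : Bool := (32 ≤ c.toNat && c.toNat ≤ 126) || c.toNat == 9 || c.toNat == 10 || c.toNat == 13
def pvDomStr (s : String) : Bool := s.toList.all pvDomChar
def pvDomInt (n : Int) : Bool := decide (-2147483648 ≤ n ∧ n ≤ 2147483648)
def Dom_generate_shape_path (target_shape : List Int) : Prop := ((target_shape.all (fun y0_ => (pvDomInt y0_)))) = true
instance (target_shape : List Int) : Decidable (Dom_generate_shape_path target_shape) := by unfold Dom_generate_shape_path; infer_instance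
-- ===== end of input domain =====

-- B builds each path tuple pointwise in closed form (min below position i, v at i, the sorted
-- target above i) instead of mutating a running shape, dropping A's per-step sort and final
-- dedup (both provably no-ops).

-- ===== PORT A =====
-- inner 'while current_shape[i] < sorted_target[i]' loop; fuel is exactly the number of
-- remaining iterations (the loop increments current_shape[i] by 1 each pass).
def gspWhile (fuel : Nat) (i : Nat) (cur : List Int) (st : List Int)
    (path : List (List Int)) : List Int × List (List Int) :=
  match fuel with
  | 0 => (cur, path)
  | fuel + 1 =>
    if cur.getD i 0 < st.getD i 0 then
      let cur' := cur.set i (cur.getD i 0 + 1)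
      gspWhile fuel i cur' st (path ++ [PySem.List.sorted cur' (fun x => x) false])
    else (cur, path)

def generate_shape_path (target_shape : List Int) : List (List Int) :=
  if target_shape = [] then []
  else
    let min_val := (PySem.List.min? target_shape (fun x => x)).getD 0
    let k := target_shape.length
    let fundamental_shape := List.replicate k min_val
    let sorted_target := PySem.List.sorted target_shape (fun x => x) false
    -- for i in range(k-1, -1, -1); indices are 0 ≤ i ≤ k-1 so .toNat is exact
    let res := (PySem.List.pyRange ((k : Int) - 1) (-1) (-1)).foldl
      (fun (s : List Int × List (List Int)) i =>
        gspWhile ((sorted_target.getD i.toNat 0 - s.1.getD i.toNat 0)).toNat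
          i.toNat s.1 sorted_target s.2)
      (fundamental_shape, [fundamental_shape])
    PySem.List.dedup res.2

-- ===== PORT B =====
def generate_shape_path_alt (target_shape : List Int) : List (List Int) :=
  if target_shape = [] then []
  else
    let min_val := (PySem.List.min? target_shape (fun x => x)).getD 0
    let k := target_shape.length
    let sorted_target := PySem.List.sorted target_shape (fun x => x) false
    (PySem.List.pyRange ((k : Int) - 1) (-1) (-1)).foldl
      (fun path i =>
        path ++ (PySem.List.pyRange (min_val + 1) (sorted_target.getD i.toNat 0 + 1) 1).map
          (fun v => (PySem.List.pyRange 0 (k : Int) 1).map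
            (fun j => if j < i then min_val else if j = i then v else sorted_target.getD j.toNat 0)))
      [List.replicate k min_val]

-- ===== PRECONDITION & SPEC =====
def Spec_generate_shape_path (target_shape : List Int) (out : List (List Int)) : Prop := out = generate_shape_path_alt target_shape
instance (target_shape : List Int) (out : List (List Int)) : Decidable (Spec_generate_shape_path target_shape out) := by unfold Spec_generate_shape_path; infer_instance

-- ===== CLAIM (what is proved, stated in full; the proofs are below) =====
def Claim_equal_generate_shape_path : Prop := ∀ (target_shape : List Int), Dom_generate_shape_path target_shape → Spec_generate_shape_path target_shape (generate_shape_path target_shape)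

-- ===== LEMMAS AND PROOFS =====

-- the closed-form tuple B builds for outer index i and value v
def gspTup (m : Int) (st : List Int) (i : Nat) (v : Int) : List Int :=
  List.replicate i m ++ v :: st.drop (i + 1)

-- one whole B segment for outer index i
def gspSeg (m : Int) (st : List Int) (i : Nat) : List (List Int) :=
  (PySem.List.pyRange (m + 1) (st.getD i 0 + 1) 1).map (gspTup m st i)

lemma gspTup_sum (m : Int) (st : List Int) (i : Nat) (v : Int) :
    (gspTup m st i v).sum = i * m + v + (st.drop (i + 1)).sum := by
  simp [gspTup, List.sum_append, List.sum_replicate, mul_comm]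
  ring

lemma gspTup_sorted (m : Int) (st : List Int) (i : Nat) (v : Int)
    (hst : st.Pairwise (· ≤ ·)) (hi : i < st.length)
    (hmv : m ≤ v) (hv : v ≤ st.getD i 0) :
    PySem.List.sorted (gspTup m st i v) (fun x => x) false = gspTup m st i v := by
  apply PySem.List.sorted_eq_self_of_pairwise
  have hdrop : ∀ x ∈ st.drop (i + 1), st[i] ≤ x := by
    have h := (hst.drop (i := i))
    rw [List.drop_eq_getElem_cons hi] at h
    exact (List.pairwise_cons.mp h).1
  rw [List.getD_eq_getElem st 0 hi] at hv
  rw [gspTup]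
  apply List.pairwise_append.mpr
  refine ⟨List.pairwise_replicate.mpr (Or.inr le_rfl), ?_, ?_⟩
  · exact List.pairwise_cons.mpr ⟨fun x hx => le_trans hv (hdrop x hx), (hst.drop (i := i+1))⟩
  · intro a ha b hb
    rw [List.eq_of_mem_replicate ha]
    rcases List.mem_cons.mp hb with h | h
    · exact h ▸ hmv
    · exact le_trans hmv (le_trans hv (hdrop b h))

-- inner while loop, closed form
lemma gspWhile_eq (m : Int) (st : List Int) (i : Nat) (c : Int) (path : List (List Int))
    (hst : st.Pairwise (· ≤ ·)) (hi : i < st.length)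
    (hmc : m ≤ c) (hc : c ≤ st.getD i 0) :
    gspWhile (st.getD i 0 - c).toNat i (gspTup m st i c) st path =
      (gspTup m st i (st.getD i 0), path ++ (PySem.List.pyRange (c + 1) (st.getD i 0 + 1) 1).map (gspTup m st i)) := by
  have hget : ∀ v : Int, (gspTup m st i v).getD i 0 = v := by intro v; simp [gspTup]
  have hset : ∀ v w : Int, (gspTup m st i v).set i w = gspTup m st i w := by
    intro v w; simp [gspTup]
  obtain ⟨n, hn⟩ : ∃ n, (st.getD i 0 - c).toNat = n := ⟨_, rfl⟩
  induction n generalizing c path with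
  | zero =>
    have hceq : c = st.getD i 0 := by omega
    subst hceq
    rw [hn, gspWhile, PySem.List.pyRange_one_eq_nil (by omega)]
    simp
  | succ n ih =>
    have hlt : c < st.getD i 0 := by omega
    rw [hn, gspWhile]
    rw [hget c, if_pos hlt, hset c (c + 1)]
    show gspWhile n i (gspTup m st i (c + 1)) st
        (path ++ [PySem.List.sorted (gspTup m st i (c + 1)) (fun x => x)]) = _
    rw [gspTup_sorted m st i (c + 1) hst hi (by omega) (by omega)]
    have := ih (c + 1) (path ++ [gspTup m st i (c + 1)]) (by omega) (by omega) (by omega)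
    rw [show ((st.getD i 0 - (c + 1)).toNat) = n from by omega] at this
    rw [this]
    rw [PySem.List.pyRange_one_cons (show c + 1 < st.getD i 0 + 1 by omega), List.map_cons]
    simp only [List.append_assoc, List.cons_append, List.nil_append]

lemma gspSeg_mem (m : Int) (st : List Int) (i : Nat) (t : List Int) :
    t ∈ gspSeg m st i ↔ ∃ v, (m + 1 ≤ v ∧ v ≤ st.getD i 0) ∧ t = gspTup m st i v := by
  simp only [gspSeg, List.mem_map, PySem.List.mem_pyRange_one]
  constructor
  · rintro ⟨v, ⟨h1, h2⟩, h3⟩; exact ⟨v, ⟨by omega, by omega⟩, h3.symm⟩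
  · rintro ⟨v, ⟨h1, h2⟩, h3⟩; exact ⟨v, ⟨by omega, by omega⟩, h3.symm⟩

-- B's flattened segment list for indices j-1 … 0
def gspF (m : Int) (st : List Int) (j : Nat) : List (List Int) :=
  (PySem.List.pyRange ((j : Int) - 1) (-1) (-1)).flatMap (fun i => gspSeg m st i.toNat)

-- the running shape at the start of outer iteration for index j-1
def gspBase (m : Int) (st : List Int) (j : Nat) : List Int :=
  List.replicate j m ++ st.drop j

lemma gspF_succ (m : Int) (st : List Int) (j : Nat) :
    gspF m st (j + 1) = gspSeg m st j ++ gspF m st j := by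
  rw [gspF, show ((j + 1 : Nat) : Int) - 1 = (j : Int) by push_cast; ring,
    PySem.List.pyRange_neg_one_cons (show (-1 : Int) < (j : Int) by omega),
    List.flatMap_cons, Int.toNat_natCast, gspF]

lemma gspF_zero (m : Int) (st : List Int) : gspF m st 0 = [] := by
  rw [gspF, show ((0:Nat):Int) - 1 = -1 by norm_num, PySem.List.pyRange_neg_one_eq_nil le_rfl]; rfl

-- sums strictly increase along base j :: F j
lemma gspF_pairwise (m : Int) (st : List Int) (j : Nat)
    (hj : j ≤ st.length) (hm : ∀ x ∈ st, m ≤ x) :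
    ((gspBase m st j :: gspF m st j).Pairwise (fun a b => a.sum < b.sum)) := by
  induction j with
  | zero => rw [gspF_zero]; exact List.pairwise_singleton _ _
  | succ j ih =>
    have hjlt : j < st.length := by omega
    have hbase_sum : ∀ p : Nat, (gspBase m st p).sum = p * m + (st.drop p).sum := by
      intro p
      simp [gspBase, List.sum_append, List.sum_replicate, mul_comm]
    have hSrel : (st.drop j).sum = st.getD j 0 + (st.drop (j + 1)).sum := by
      rw [List.drop_eq_getElem_cons hjlt, List.sum_cons, List.getD_eq_getElem st 0 hjlt]
    have hmj : m ≤ st.getD j 0 := by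
      rw [List.getD_eq_getElem st 0 hjlt]; exact hm _ (st.getElem_mem hjlt)
    have ihp := ih (by omega)
    have hFj : ∀ t ∈ gspF m st j, (gspBase m st j).sum < t.sum :=
      (List.pairwise_cons.mp ihp).1
    have hPF := (List.pairwise_cons.mp ihp).2
    rw [gspF_succ]
    apply List.pairwise_cons.mpr
    constructor
    · intro t ht
      rcases List.mem_append.mp ht with h | h
      · obtain ⟨v, ⟨hv1, hv2⟩, rfl⟩ := (gspSeg_mem m st j t).mp h
        rw [hbase_sum, gspTup_sum]
        push_cast
        nlinarith
      · calc (gspBase m st (j + 1)).sum ≤ (gspBase m st j).sum := by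
              rw [hbase_sum, hbase_sum, hSrel]; push_cast; nlinarith
          _ < t.sum := hFj t h
    · apply List.pairwise_append.mpr
      refine ⟨?_, hPF, ?_⟩
      · rw [gspSeg, List.pairwise_map]
        apply (PySem.List.pairwise_lt_pyRange_one _ _).imp
        intro a b hab
        rw [gspTup_sum, gspTup_sum]
        omega
      · intro s hs t ht
        obtain ⟨v, ⟨hv1, hv2⟩, rfl⟩ := (gspSeg_mem m st j s).mp hs
        calc (gspTup m st j v).sum ≤ (gspBase m st j).sum := by
              rw [gspTup_sum, hbase_sum, hSrel]; omega
          _ < t.sum := hFj t ht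

-- A's outer fold, closed form
lemma gspFold_eq (m : Int) (st : List Int) (j : Nat) (path : List (List Int))
    (hst : st.Pairwise (· ≤ ·)) (hj : j ≤ st.length) (hm : ∀ x ∈ st, m ≤ x) :
    (PySem.List.pyRange ((j : Int) - 1) (-1) (-1)).foldl
      (fun (s : List Int × List (List Int)) i =>
        gspWhile ((st.getD i.toNat 0 - s.1.getD i.toNat 0)).toNat i.toNat s.1 st s.2)
      (gspBase m st j, path) = (st, path ++ gspF m st j) := by
  induction j generalizing path with
  | zero =>
    rw [show ((0 : Nat) : Int) - 1 = -1 by norm_num,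
      PySem.List.pyRange_neg_one_eq_nil le_rfl, gspF_zero]
    simp [gspBase]
  | succ j ih =>
    have hjlt : j < st.length := by omega
    have hmj : m ≤ st.getD j 0 := by
      rw [List.getD_eq_getElem st 0 hjlt]; exact hm _ (st.getElem_mem hjlt)
    rw [show ((j + 1 : Nat) : Int) - 1 = (j : Int) by push_cast; ring,
      PySem.List.pyRange_neg_one_cons (show (-1 : Int) < (j : Int) by omega),
      List.foldl_cons]
    have hbase : gspBase m st (j + 1) = gspTup m st j m := by
      rw [gspBase, gspTup, List.replicate_succ', List.append_assoc, List.singleton_append]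
    have hfin : gspTup m st j (st.getD j 0) = gspBase m st j := by
      rw [gspTup, gspBase, List.drop_eq_getElem_cons hjlt, List.getD_eq_getElem st 0 hjlt]
    rw [hbase, Int.toNat_natCast]
    have hget : (gspTup m st j m).getD j 0 = m := by simp [gspTup]
    rw [hget, gspWhile_eq m st j m path hst hjlt le_rfl hmj, hfin]
    rw [ih (path ++ (PySem.List.pyRange (m + 1) (st.getD j 0 + 1) 1).map (gspTup m st j)) (by omega)]
    rw [gspF_succ, gspSeg, List.append_assoc]

-- B's pointwise tuple is exactly gspTup
lemma gspTup_closed (m v : Int) (st : List Int) (i : Nat) (hi : i < st.length) :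
    (PySem.List.pyRange 0 ((st.length : Int)) 1).map
      (fun j => if j < (i : Int) then m else if j = (i : Int) then v else st.getD j.toNat 0)
    = gspTup m st i v := by
  rw [PySem.List.pyRange_zero_natCast, List.map_map, gspTup]
  apply List.ext_getElem
  · simp; omega
  · intro n h1 h2
    have hn : n < st.length := by simpa using h1
    simp only [List.getElem_map, List.getElem_range, Function.comp_apply, Int.toNat_natCast]
    rcases lt_trichotomy n i with h | h | h
    · rw [if_pos (by exact_mod_cast h), List.getElem_append_left (by simpa using h),
        List.getElem_replicate]
    · rw [if_neg (by omega), if_pos (by exact_mod_cast h)]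
      subst h
      rw [List.getElem_append_right (by simp)]
      simp
    · rw [if_neg (by exact_mod_cast not_lt.mpr h.le),
        if_neg (by exact_mod_cast (by omega : ¬ (n : Int) = (i : Int)))]
      rw [List.getElem_append_right (by simp; omega)]
      simp only [List.length_replicate]
      obtain ⟨d, hd⟩ : ∃ d, n - i = d + 1 := ⟨n - i - 1, by omega⟩
      simp only [hd, List.getElem_cons_succ, List.getElem_drop, List.getD_eq_getElem st 0 hn]
      congr 1
      omega

-- B's flattened loop body is gspF
lemma gspF_eq_flatMap (m : Int) (st : List Int) (j : Nat) (hj : j ≤ st.length) :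
    (PySem.List.pyRange ((j : Int) - 1) (-1) (-1)).flatMap
      (fun i => (PySem.List.pyRange (m + 1) (st.getD i.toNat 0 + 1) 1).map
        (fun v => (PySem.List.pyRange 0 ((st.length : Int)) 1).map
          (fun jj => if jj < i then m else if jj = i then v else st.getD jj.toNat 0)))
    = gspF m st j := by
  induction j with
  | zero =>
    rw [gspF_zero, show ((0 : Nat) : Int) - 1 = -1 by norm_num,
      PySem.List.pyRange_neg_one_eq_nil le_rfl, List.flatMap_nil]
  | succ j ih =>
    rw [show ((j + 1 : Nat) : Int) - 1 = (j : Int) by push_cast; ring,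
      PySem.List.pyRange_neg_one_cons (show (-1 : Int) < (j : Int) by omega),
      List.flatMap_cons, gspF_succ, ih (by omega)]
    congr 1
    rw [gspSeg, Int.toNat_natCast]
    apply List.map_congr_left
    intro v _
    exact gspTup_closed m v st j (by omega)

-- ===== VERDICT (by name: the statement is the Claim_ definition above) =====
theorem generate_shape_path_spec : Claim_equal_generate_shape_path := by
  intro ts _
  unfold Spec_generate_shape_path
  by_cases hne : ts = []
  · subst hne; rfl
  · obtain ⟨m, hmin⟩ : ∃ m, PySem.List.min? ts (fun x => x) = some m := by
      cases h : PySem.List.min? ts (fun x => x) with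
      | none => exact absurd ((PySem.List.min?_eq_none_iff ts _).mp h) hne
      | some m => exact ⟨m, rfl⟩
    have hst : (PySem.List.sorted ts (fun x => x) false).Pairwise (· ≤ ·) :=
      PySem.List.sorted_pairwise ts _
    have hm : ∀ x ∈ PySem.List.sorted ts (fun x => x) false, m ≤ x := fun x hx =>
      PySem.List.min?_isMin hmin x ((PySem.List.mem_sorted ts _ false x).mp hx)
    have hlen : (PySem.List.sorted ts (fun x => x) false).length = ts.length :=
      PySem.List.length_sorted ts _ false
    have hbk : gspBase m (PySem.List.sorted ts (fun x => x) false) ts.length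
        = List.replicate ts.length m := by
      rw [gspBase, ← hlen, List.drop_length, List.append_nil]
    simp only [generate_shape_path, generate_shape_path_alt, if_neg hne, hmin, Option.getD_some]
    rw [← hbk,
      gspFold_eq m (PySem.List.sorted ts (fun x => x) false) ts.length
        [gspBase m (PySem.List.sorted ts (fun x => x) false) ts.length] hst (le_of_eq hlen.symm) hm,
      PySem.List.foldl_append_eq_flatMap,
      show (ts.length : Int) = ((PySem.List.sorted ts (fun x => x) false).length : Int) by rw [hlen],
      gspF_eq_flatMap m (PySem.List.sorted ts (fun x => x) false)
        (PySem.List.sorted ts (fun x => x) false).length le_rfl]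
    have hnd : ([gspBase m (PySem.List.sorted ts (fun x => x) false) ts.length]
        ++ gspF m (PySem.List.sorted ts (fun x => x) false) ts.length).Nodup := by
      have hp := gspF_pairwise m (PySem.List.sorted ts (fun x => x) false) ts.length
        (le_of_eq hlen.symm) hm
      exact hp.imp (fun h => by rintro rfl; exact lt_irrefl _ h)
    rw [PySem.List.dedup_eq_ofList, PySem.Set.ofList_eq_self_of_nodup _ hnd, hbk, hlen]
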